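-- pv_equiv track=rewrite | github.com/AnasTaibani/EduNiti-AI-Tutor-for-Personalized-NCERT-Learning | Preprocessing/hybrid_chunking.py | merge_to_target
-- ===== SOURCE A (Python) =====
-- TARGET_WORDS = 250
--
-- MIN_WORDS = 120
--
-- STRIDE_WORDS = 100
--
-- def merge_to_target(blocks, target=TARGET_WORDS, min_w=MIN_WORDS, stride=STRIDE_WORDS):
--     out=[]
--     cur=[]
--     curw=0
--     for b in blocks:
--         w = len(b.split())
--         if curw + w > target and cur:
--             out.append(" ".join(cur))
--             # start new buffer; include overlap: keep last `stride` words from previous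
--             cur = [b]
--             curw = w
--         else:
--             cur.append(b); curw += w
--     if cur:
--         out.append(" ".join(cur))
--     # cleanup: merge smalls
--     final=[]
--     for c in out:
--         if final and len(c.split()) < min_w:
--             final[-1] = final[-1] + " " + c
--         else:
--             final.append(c)
--     return final
-- ===== SOURCE B (Python) =====
-- TARGET_WORDS = 250
--
-- MIN_WORDS = 120
--
-- STRIDE_WORDS = 100
--
-- def merge_to_target(blocks, target=TARGET_WORDS, min_w=MIN_WORDS, stride=STRIDE_WORDS):
--     # Boundary-planning design: instead of accumulating buffers, first compute the
--     # chunk boundaries as a list of block indices, then materialize each chunk with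
--     # one slice+join; the small-chunk merge is likewise planned as group boundaries
--     # over the chunk list and materialized by slicing the chunk list.
--     cuts = []
--     run = 0
--     for i, b in enumerate(blocks):
--         w = len(b.split())
--         if not cuts or run + w > target:
--             cuts.append(i)
--             run = w
--         else:
--             run += w
--     cuts.append(len(blocks))
--     chunks = [" ".join(blocks[a:b]) for a, b in zip(cuts, cuts[1:])]
--     gcuts = [j for j, c in enumerate(chunks) if j == 0 or len(c.split()) >= min_w]
--     gcuts.append(len(chunks))
--     return [" ".join(chunks[a:b]) for a, b in zip(gcuts, gcuts[1:])]
-- ===== Notes on version B (the rewrite author's own statement) =====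
-- stated objective: alternative
-- what changed: A streams through the blocks maintaining mutable buffers (a list of blocks, then a result list whose last element is mutated to absorb small chunks); B instead plans boundaries as index lists -- first chunk cut points over the blocks, then group cut points over the chunks -- and materializes each output element with a single slice+join, never mutating previously produced output.
import Mathlib
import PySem

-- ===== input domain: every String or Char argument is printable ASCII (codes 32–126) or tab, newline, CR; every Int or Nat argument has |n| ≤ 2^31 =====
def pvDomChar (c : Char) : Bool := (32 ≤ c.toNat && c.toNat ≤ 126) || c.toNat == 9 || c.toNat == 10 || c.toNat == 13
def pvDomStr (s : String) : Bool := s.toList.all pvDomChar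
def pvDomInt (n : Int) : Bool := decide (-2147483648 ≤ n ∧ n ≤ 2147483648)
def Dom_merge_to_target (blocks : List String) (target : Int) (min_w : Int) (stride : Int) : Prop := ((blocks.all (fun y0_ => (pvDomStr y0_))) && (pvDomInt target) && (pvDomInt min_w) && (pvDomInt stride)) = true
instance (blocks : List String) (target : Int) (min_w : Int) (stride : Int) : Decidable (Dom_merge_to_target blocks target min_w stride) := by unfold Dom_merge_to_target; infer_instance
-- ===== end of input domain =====

-- B replaces A's mutable-buffer streaming with boundary planning: cut-index lists are
-- computed first and every output element is one slice+join; objective: alternative.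

-- word count of a block: len(b.split())
def mttWc (b : String) : Int := ((PySem.Str.split₀ b).length : Int)

-- ===== PORT A =====
-- loop body of A's first for-loop: state (out, cur, curw)
def mttStepA (target : Int) (st : List String × List String × Int) (b : String) :
    List String × List String × Int :=
  let w : Int := mttWc b
  if st.2.2 + w > target ∧ st.2.1 ≠ [] then
    (st.1 ++ [PySem.Str.join " " st.2.1], [b], w)
  else
    (st.1, st.2.1 ++ [b], st.2.2 + w)

-- loop body of A's cleanup for-loop (final[-1] = final[-1] + " " + c / final.append(c))
def mttCleanStep (min_w : Int) (final : List String) (c : String) : List String :=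
  if final ≠ [] ∧ mttWc c < min_w then
    final.dropLast ++ [final.getLast! ++ " " ++ c]
  else
    final ++ [c]

def merge_to_target (blocks : List String) (target : Int) (min_w : Int) (stride : Int) : List String :=
  let st := blocks.foldl (mttStepA target) ([], [], 0)
  let out := if st.2.1 ≠ [] then st.1 ++ [PySem.Str.join " " st.2.1] else st.1
  out.foldl (mttCleanStep min_w) []

-- ===== PORT B =====
-- loop body of B's planning loop over enumerate(blocks): state (cuts, run)
def mttCutStep (target : Int) (st : List Int × Int) (ib : Int × String) : List Int × Int :=
  let w : Int := mttWc ib.2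
  if st.1 = [] ∨ st.2 + w > target then (st.1 ++ [ib.1], w) else (st.1, st.2 + w)

def merge_to_target_alt (blocks : List String) (target : Int) (min_w : Int) (stride : Int) : List String :=
  let c := (PySem.List.enumerate blocks 0).foldl (mttCutStep target) ([], 0)
  let cuts := c.1 ++ [(blocks.length : Int)]
  let chunks := (cuts.zip cuts.tail).map
    (fun p => PySem.Str.join " " (PySem.List.slice blocks (some p.1) (some p.2)))
  let gcuts := ((PySem.List.enumerate chunks 0).filter
      (fun jc => jc.1 == 0 || min_w ≤ mttWc jc.2)).map (·.1) ++ [(chunks.length : Int)]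
  (gcuts.zip gcuts.tail).map
    (fun p => PySem.Str.join " " (PySem.List.slice chunks (some p.1) (some p.2)))

-- ===== PRECONDITION & SPEC =====
def Spec_merge_to_target (blocks : List String) (target : Int) (min_w : Int) (stride : Int) (out : List String) : Prop := out = merge_to_target_alt blocks target min_w stride
instance (blocks : List String) (target : Int) (min_w : Int) (stride : Int) (out : List String) : Decidable (Spec_merge_to_target blocks target min_w stride out) := by unfold Spec_merge_to_target; infer_instance

-- ===== CLAIM (what is proved, stated in full; the proofs are below) =====
def Claim_equal_merge_to_target : Prop := ∀ (blocks : List String) (target : Int) (min_w : Int) (stride : Int), Dom_merge_to_target blocks target min_w stride → Spec_merge_to_target blocks target min_w stride (merge_to_target blocks target min_w stride)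

-- ===== LEMMAS AND PROOFS =====

-- the recursive reading of "map slice+join over consecutive cut pairs"
def mttPairs (xs : List String) : List Int → List String
  | a :: b :: r => PySem.Str.join " " (PySem.List.slice xs (some a) (some b)) :: mttPairs xs (b :: r)
  | _ => []

-- A's chunk partition, as lists of blocks (the common pivot of both phase-1 passes)
def mttPart (target : Int) : Int → List String → List String → List (List String)
  | _, cur, [] => [cur]
  | curw, cur, b :: bs =>
      let w := mttWc b
      if curw + w > target ∧ cur ≠ [] then cur :: mttPart target w [b] bs
      else mttPart target (curw + w) (cur ++ [b]) bs

-- the small-chunk grouping (the common pivot of both phase-2 passes)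
def mttPart2 (min_w : Int) : String → List String → List String
  | acc, [] => [acc]
  | acc, c :: cs =>
      if mttWc c < min_w then mttPart2 min_w (acc ++ " " ++ c) cs
      else acc :: mttPart2 min_w c cs

lemma mtt_zip_eq_pairs (xs : List String) : ∀ (l : List Int),
    (l.zip l.tail).map (fun p => PySem.Str.join " " (PySem.List.slice xs (some p.1) (some p.2)))
      = mttPairs xs l
  | [] => rfl
  | [_] => rfl
  | a :: b :: r => by
      simp only [List.tail_cons, List.zip_cons_cons, List.map_cons, mttPairs]
      exact congrArg _ (mtt_zip_eq_pairs xs (b :: r))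

lemma mtt_pairs_append2 (xs : List String) (a b : Int) : ∀ (cs : List Int),
    mttPairs xs (cs ++ [a, b])
      = mttPairs xs (cs ++ [a]) ++ [PySem.Str.join " " (PySem.List.slice xs (some a) (some b))]
  | [] => rfl
  | [x] => rfl
  | x :: y :: cs => by
      simp only [List.cons_append, mttPairs]
      exact congrArg _ (mtt_pairs_append2 xs a b (y :: cs))

lemma mtt_join_singleton (b : String) : PySem.Str.join " " [b] = b := by
  simp [PySem.Str.join, PySem.Chars.join, List.intercalate]

lemma mtt_ofList_space_cons (cs : List Char) :
    String.ofList (' ' :: cs) = " " ++ String.ofList cs := by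
  apply String.toList_injective
  simp

lemma mtt_join_cons_cons (x y : String) (t : List String) :
    PySem.Str.join " " (x :: y :: t) = x ++ " " ++ PySem.Str.join " " (y :: t) := by
  simp [PySem.Str.join, PySem.Chars.join, List.intercalate, mtt_ofList_space_cons,
    String.append_assoc]

lemma mtt_join_append_singleton (x : String) (r : List String) (b : String) :
    PySem.Str.join " " (x :: (r ++ [b])) = PySem.Str.join " " (x :: r) ++ " " ++ b := by
  induction r generalizing x with
  | nil => simp [mtt_join_cons_cons, mtt_join_singleton]
  | cons y t ih =>
    have h1 : x :: (y :: t ++ [b]) = x :: y :: (t ++ [b]) := rfl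
    rw [h1, mtt_join_cons_cons, ih y, mtt_join_cons_cons]
    simp [String.append_assoc]

lemma mtt_part_ne_nil (target : Int) : ∀ (bs : List String) (curw : Int) (cur : List String),
    mttPart target curw cur bs ≠ []
  | [], _, _ => by simp [mttPart]
  | b :: bs, curw, cur => by
      simp only [mttPart]
      split
      · simp
      · exact mtt_part_ne_nil target bs _ _

-- A's first fold computes the joins of mttPart (and the buffer stays nonempty)
lemma mtt_A1 (target : Int) : ∀ (bs out cur curw), cur ≠ [] →
    ((bs.foldl (mttStepA target) (out, cur, curw)).2.1 ≠ [] ∧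
     (bs.foldl (mttStepA target) (out, cur, curw)).1
       ++ [PySem.Str.join " " (bs.foldl (mttStepA target) (out, cur, curw)).2.1]
       = out ++ (mttPart target curw cur bs).map (PySem.Str.join " ")) := by
  intro bs
  induction bs with
  | nil => intro out cur curw h; simpa [mttPart] using h
  | cons b bs ih =>
    intro out cur curw h
    simp only [List.foldl_cons, mttStepA, mttPart]
    split
    · next hc =>
        have := ih (out ++ [PySem.Str.join " " cur]) [b] (mttWc b) (by simp)
        simpa [List.append_assoc] using this
    · next hc =>
        have := ih out (cur ++ [b]) (curw + mttWc b) (by simp)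
        simpa using this

-- A's cleanup fold computes mttPart2
lemma mtt_A2 (min_w : Int) : ∀ (cs : List String) (final : List String) (acc : String),
    (cs.foldl (mttCleanStep min_w) (final ++ [acc])) = final ++ mttPart2 min_w acc cs := by
  intro cs
  induction cs with
  | nil => intro final acc; simp [mttPart2]
  | cons c cs ih =>
    intro final acc
    simp only [List.foldl_cons, mttCleanStep, mttPart2]
    by_cases hs : mttWc c < min_w
    · rw [if_pos (show (final ++ [acc]) ≠ [] ∧ mttWc c < min_w from ⟨by simp, hs⟩), if_pos hs]
      have h1 : (final ++ [acc]).dropLast = final := by simp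
      have h2 : (final ++ [acc]).getLast! = acc := by
        cases final with
        | nil => rfl
        | cons x r => simp [List.getLast!]
      rw [h1, h2, ih final (acc ++ " " ++ c)]
    · rw [if_neg (show ¬((final ++ [acc]) ≠ [] ∧ mttWc c < min_w) from fun h => hs h.2),
        if_neg hs, show final ++ [acc] ++ [c] = (final ++ [acc]) ++ [c] from rfl,
        ih (final ++ [acc]) c]
      simp

-- slice with nat endpoints inside range is take of drop
lemma mtt_slice_nat (xs : List String) (a b : Nat) :
    PySem.List.slice xs (some (a : Int)) (some (b : Int)) = (xs.drop a).take (b - a) :=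
  PySem.List.slice_natCast xs a b

-- B's planning fold computes the same partition, read through mttPairs
lemma mtt_B1 (target : Int) : ∀ (bs : List String) (i : Nat) (blocks : List String)
    (cuts : List Int) (a : Nat) (run : Int),
    blocks.drop i = bs → a < i → i ≤ blocks.length →
    mttPairs blocks
        (((PySem.List.enumerate bs (i : Int)).foldl (mttCutStep target) (cuts ++ [(a : Int)], run)).1
          ++ [(blocks.length : Int)])
      = mttPairs blocks (cuts ++ [(a : Int)])
        ++ (mttPart target run ((blocks.drop a).take (i - a)) bs).map (PySem.Str.join " ") := by
  intro bs
  induction bs with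
  | nil =>
    intro i blocks cuts a run hdrop hai hlen
    have hi : i = blocks.length := le_antisymm hlen (by
      have := congrArg List.length hdrop; simp at this; omega)
    subst hi
    have htake : (blocks.drop a).take (blocks.length - a) = blocks.drop a := by
      apply List.take_of_length_le; simp
    simp only [PySem.List.enumerate, List.foldl_nil, mttPart, List.map]
    rw [show cuts ++ [(a : Int)] ++ [(blocks.length : Int)] = cuts ++ [(a : Int), (blocks.length : Int)] by simp,
      mtt_pairs_append2, mtt_slice_nat, htake]
  | cons b bs ih =>
    intro i blocks cuts a run hdrop hai hlen
    have hi_lt : i < blocks.length := by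
      have := congrArg List.length hdrop; simp at this; omega
    have hcons : blocks[i]'hi_lt :: blocks.drop (i+1) = b :: bs :=
      (List.drop_eq_getElem_cons hi_lt).symm.trans hdrop
    have hbi : blocks[i]'hi_lt = b := by injection hcons
    have hdrop' : blocks.drop (i + 1) = bs := by injection hcons
    have hcur_ext : (blocks.drop a).take (i + 1 - a) = (blocks.drop a).take (i - a) ++ [b] := by
      have h1 : i + 1 - a = (i - a) + 1 := by omega
      rw [h1, List.take_succ]
      have h2 : (blocks.drop a)[i - a]? = some b := by
        rw [List.getElem?_drop]
        have : a + (i - a) = i := by omega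
        rw [this, List.getElem?_eq_getElem hi_lt, hbi]
      simp [h2]
    have hcur_ne : (blocks.drop a).take (i - a) ≠ [] := by
      have : ((blocks.drop a).take (i - a)).length = min (i - a) (blocks.length - a) := by simp
      intro hnil; rw [hnil] at this; simp at this; omega
    rw [show (PySem.List.enumerate (b :: bs) (i : Int))
        = ((i : Int), b) :: PySem.List.enumerate bs (((i + 1 : Nat)) : Int) by
          rw [PySem.List.enumerate_cons]; norm_num]
    simp only [List.foldl_cons, mttCutStep, mttPart]
    by_cases hov : run + mttWc b > target
    · rw [if_pos (Or.inr hov), if_pos ⟨hov, hcur_ne⟩]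
      have hIH := ih (i + 1) blocks (cuts ++ [(a : Int)]) i (mttWc b) hdrop' (by omega) (by omega)
      have htake1 : (blocks.drop i).take (i + 1 - i) = [b] := by
        rw [show i + 1 - i = 1 by omega, hdrop]; rfl
      rw [htake1] at hIH
      rw [hIH,
        show cuts ++ [(a : Int)] ++ [(i : Int)] = cuts ++ [(a : Int), (i : Int)] by simp,
        mtt_pairs_append2, mtt_slice_nat]
      simp [List.map_cons]
    · rw [if_neg (show ¬(cuts ++ [(a : Int)] = [] ∨ run + mttWc b > target) from by
          rintro (h | h)
          · simp at h
          · exact hov h),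
        if_neg (fun h => hov h.1)]
      have hIH := ih (i + 1) blocks cuts a (run + mttWc b) hdrop' (by omega) (by omega)
      rw [hIH, hcur_ext]

-- B's group-planning filter computes mttPart2, read through mttPairs
lemma mtt_B2 (min_w : Int) : ∀ (cs : List String) (j : Nat) (chunks : List String)
    (g : List Int) (a : Nat),
    chunks.drop j = cs → a < j → j ≤ chunks.length →
    mttPairs chunks
        ((g ++ [(a : Int)])
          ++ ((PySem.List.enumerate cs (j : Int)).filter
                (fun jc => jc.1 == 0 || min_w ≤ mttWc jc.2)).map (·.1)
          ++ [(chunks.length : Int)])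
      = mttPairs chunks (g ++ [(a : Int)])
        ++ mttPart2 min_w (PySem.Str.join " " ((chunks.drop a).take (j - a))) cs := by
  intro cs
  induction cs with
  | nil =>
    intro j chunks g a hdrop haj hlen
    have hj : j = chunks.length := le_antisymm hlen (by
      have := congrArg List.length hdrop; simp at this; omega)
    subst hj
    have htake : (chunks.drop a).take (chunks.length - a) = chunks.drop a := by
      apply List.take_of_length_le; simp
    simp only [PySem.List.enumerate, List.filter_nil, List.map_nil, List.append_nil, mttPart2]
    rw [show g ++ [(a : Int)] ++ [(chunks.length : Int)] = g ++ [(a : Int), (chunks.length : Int)] by simp,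
      mtt_pairs_append2, mtt_slice_nat, htake]
  | cons c cs ih =>
    intro j chunks g a hdrop haj hlen
    have hj_lt : j < chunks.length := by
      have := congrArg List.length hdrop; simp at this; omega
    have hcons : chunks[j]'hj_lt :: chunks.drop (j+1) = c :: cs :=
      (List.drop_eq_getElem_cons hj_lt).symm.trans hdrop
    have hcj : chunks[j]'hj_lt = c := by injection hcons
    have hdrop' : chunks.drop (j + 1) = cs := by injection hcons
    have hcur : (chunks.drop a).take (j - a) ≠ [] := by
      have : ((chunks.drop a).take (j - a)).length = min (j - a) (chunks.length - a) := by simp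
      intro hnil; rw [hnil] at this; simp at this; omega
    obtain ⟨x, r, hxr⟩ : ∃ x r, (chunks.drop a).take (j - a) = x :: r := by
      cases h : (chunks.drop a).take (j - a) with
      | nil => exact absurd h hcur
      | cons x r => exact ⟨x, r, rfl⟩
    have hcur_ext : (chunks.drop a).take (j + 1 - a) = (chunks.drop a).take (j - a) ++ [c] := by
      have h1 : j + 1 - a = (j - a) + 1 := by omega
      rw [h1, List.take_succ]
      have h2 : (chunks.drop a)[j - a]? = some c := by
        rw [List.getElem?_drop]
        have : a + (j - a) = j := by omega
        rw [this, List.getElem?_eq_getElem hj_lt, hcj]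
      simp [h2]
    have hjz : (((j : Nat) : Int) == 0) = false := by
      simp; omega
    rw [show (PySem.List.enumerate (c :: cs) (j : Int))
        = ((j : Int), c) :: PySem.List.enumerate cs (((j + 1 : Nat)) : Int) by
          rw [PySem.List.enumerate_cons]; norm_num]
    simp only [List.filter_cons, hjz, Bool.false_or, mttPart2]
    by_cases hbig : min_w ≤ mttWc c
    · have hd : (decide (min_w ≤ mttWc c)) = true := by simpa using hbig
      rw [hd]
      simp only [if_true, List.map_cons]
      rw [if_neg (not_lt.mpr hbig)]
      have hIH := ih (j + 1) chunks (g ++ [(a : Int)]) j hdrop' (by omega) (by omega)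
      have htake1 : (chunks.drop j).take (j + 1 - j) = [c] := by
        rw [show j + 1 - j = 1 by omega, hdrop]; rfl
      rw [htake1, mtt_join_singleton] at hIH
      have hre : ∀ (M L p : List Int), (p ++ ((j : Int) :: M) ++ L) = ((p ++ [(j : Int)]) ++ M ++ L) := by
        intro M L p; simp
      rw [hre, hIH,
        show g ++ [(a : Int)] ++ [(j : Int)] = g ++ [(a : Int), (j : Int)] by simp,
        mtt_pairs_append2, mtt_slice_nat]
      simp
    · have hd : (decide (min_w ≤ mttWc c)) = false := by simpa using hbig
      rw [hd]
      simp only [Bool.false_eq_true, if_false]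
      rw [if_pos (lt_of_not_ge hbig)]
      have hIH := ih (j + 1) chunks g a hdrop' (by omega) (by omega)
      rw [hIH, hcur_ext, hxr,
        show (x :: r) ++ [c] = x :: (r ++ [c]) from rfl,
        mtt_join_append_singleton, ← hxr]

-- ===== VERDICT (by name: the statement is the Claim_ definition above) =====
theorem merge_to_target_spec : Claim_equal_merge_to_target := by
  intro blocks target min_w stride _
  show merge_to_target blocks target min_w stride = merge_to_target_alt blocks target min_w stride
  unfold merge_to_target merge_to_target_alt
  cases blocks with
  | nil => rfl
  | cons b bs =>
    simp only [mtt_zip_eq_pairs]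
    -- phase 1, A side
    have hA0 : mttStepA target ([], [], 0) b = ([], [b], mttWc b) := by
      simp [mttStepA]
    have hA1 := mtt_A1 target bs [] [b] (mttWc b) (by simp)
    -- phase 1, B side
    have hB0 : mttCutStep target ([], 0) ((0 : Int), b) = ([(0 : Int)], mttWc b) := by
      simp [mttCutStep]
    have hB1 := mtt_B1 target bs 1 (b :: bs) [] 0 (mttWc b) (by simp) (by omega) (by simp)
    rw [show PySem.List.enumerate (b :: bs) 0 = ((0:Int), b) :: PySem.List.enumerate bs 1
        from PySem.List.enumerate_cons ..]
    simp only [List.foldl_cons, hA0, hB0]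
    have hB1' : mttPairs (b :: bs)
        (((PySem.List.enumerate bs (1 : Int)).foldl (mttCutStep target) ([(0 : Int)], mttWc b)).1
          ++ [((b :: bs).length : Int)])
        = (mttPart target (mttWc b) [b] bs).map (PySem.Str.join " ") := by
      have h01 : ((1 : Nat) : Int) = (1 : Int) := by norm_num
      have := hB1
      rw [h01] at this
      simpa [mttPairs] using this
    set CH := (mttPart target (mttWc b) [b] bs).map (PySem.Str.join " ") with hCH
    -- chunks on the B side equal CH
    rw [hB1']
    -- A's out equals CH
    have hAne := hA1.1
    have hAeq := hA1.2
    rw [if_pos hAne]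
    simp only [List.nil_append] at hAeq
    rw [hAeq]
    -- phase 2
    have hCHne : CH ≠ [] := by
      rw [hCH]
      simp [mtt_part_ne_nil]
    obtain ⟨c0, cs, hc0⟩ : ∃ c0 cs, CH = c0 :: cs := by
      cases h : CH with
      | nil => exact absurd h hCHne
      | cons c0 cs => exact ⟨c0, cs, rfl⟩
    rw [hc0]
    have hA20 : mttCleanStep min_w [] c0 = [c0] := by simp [mttCleanStep]
    have hA2 := mtt_A2 min_w cs [] c0
    simp only [List.nil_append] at hA2
    simp only [List.foldl_cons, hA20]
    rw [hA2]
    rw [show PySem.List.enumerate (c0 :: cs) 0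
        = ((0 : Int), c0) :: PySem.List.enumerate cs (((1 : Nat)) : Int) by
          rw [PySem.List.enumerate_cons]; norm_num]
    rw [List.filter_cons_of_pos (by simp)]
    simp only [List.map_cons]
    have hB2 := mtt_B2 min_w cs 1 (c0 :: cs) [] 0 (by simp) (by omega) (by simp)
    have htake1 : ((c0 :: cs).drop 0).take (1 - 0) = [c0] := by rfl
    rw [htake1, mtt_join_singleton] at hB2
    have hre : ∀ (M L : List Int), (((0 : Int) :: M) ++ L) = (([] ++ [((0 : Nat) : Int)]) ++ M ++ L) := by
      intro M L; simp
    rw [hre, hB2]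
    simp [mttPairs]
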